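-- pv_equiv track=rewrite | github.com/jaxels20/GNN-proces-discovery | gnn_miner/ml_models/inference.py | find_silent_transitions
-- ===== SOURCE A (Python) =====
-- def find_silent_transitions(places, silent_transition_indices):
--   if len(silent_transition_indices) == 0:
--     return []
--   silent_transitions = []
--   added_per_place = [(i - 1)*2 for i in range(1, len(places) + 1)]
--   added_total_per_place = [sum(added_per_place[:i + 1]) for i in range(len(places))]
--   connections = sum([list(range(i)) for i in range(1, len(places) + 1)], [])
--   for silent_transition_index in silent_transition_indices:
--     connection_1, count = next(((i, c) for i, c in enumerate(added_total_per_place) if c > silent_transition_index), (None, None))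
--     connection_2 = connections[int(silent_transition_index / 2.)]
--     s = (places[connection_2], places[connection_1]) if (silent_transition_index % 2 == 0) else (places[connection_1], places[connection_2])
--     silent_transitions.append(s)
--   return silent_transitions
-- ===== SOURCE B (Python) =====
-- def find_silent_transitions(places, silent_transition_indices):
--     n = len(places)
--     silent_transitions = []
--     for t in silent_transition_indices:
--         # binary search: smallest r in [0, n] with r*(r+1) > t
--         lo, hi = 0, n
--         while lo < hi:
--             mid = (lo + hi) // 2
--             if mid * (mid + 1) > t:
--                 hi = mid
--             else:
--                 lo = mid + 1
--         r = lo
--         # pair index int(t / 2) (A's truncating convention), minus triangular offset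
--         c2 = int(t / 2) - r * (r - 1) // 2
--         if t % 2 == 0:
--             silent_transitions.append((places[c2], places[r]))
--         else:
--             silent_transitions.append((places[r], places[c2]))
--     return silent_transitions
-- ===== Notes on version B (the rewrite author's own statement) =====
-- stated objective: alternative
-- what changed: replaces A's O(n^2) precomputed prefix-sum and flattened connections tables plus a per-index linear scan with a per-index binary search that inverts the triangular numbers directly (asymptotically lighter, though a timing run could not measure it here)
-- outside the precondition, e.g. on find_silent_transitions([5, 6, 7], [-8]): A returns [(6, 5)], B raises IndexError
import Mathlib
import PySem

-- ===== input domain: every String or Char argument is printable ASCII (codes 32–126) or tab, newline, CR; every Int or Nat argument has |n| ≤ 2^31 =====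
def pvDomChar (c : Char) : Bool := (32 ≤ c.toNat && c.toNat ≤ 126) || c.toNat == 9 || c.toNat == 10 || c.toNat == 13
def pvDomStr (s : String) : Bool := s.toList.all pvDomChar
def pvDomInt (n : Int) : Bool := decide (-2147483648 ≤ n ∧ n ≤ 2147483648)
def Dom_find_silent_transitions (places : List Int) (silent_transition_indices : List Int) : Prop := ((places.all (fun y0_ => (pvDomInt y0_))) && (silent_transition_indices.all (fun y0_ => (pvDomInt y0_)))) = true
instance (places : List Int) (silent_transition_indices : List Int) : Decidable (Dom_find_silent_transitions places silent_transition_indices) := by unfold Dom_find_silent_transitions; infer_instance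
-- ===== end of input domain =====

-- B replaces A's precomputed prefix-sum/connections tables and per-index linear scan with a
-- per-index binary search inverting the triangular numbers (objective: alternative algorithm).

-- ===== PORT A =====
def find_silent_transitions (places : List Int) (silent_transition_indices : List Int) : List (Int × Int) :=
  if silent_transition_indices.length = 0 then []
  else
    let n : Int := (places.length : Int)
    let added_per_place : List Int := (PySem.List.pyRange 1 (n + 1) 1).map (fun i => (i - 1) * 2)
    let added_total_per_place : List Int :=
      (PySem.List.pyRange 0 n 1).map (fun i => (PySem.List.slice added_per_place none (some (i + 1))).sum)
    let connections : List Int :=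
      ((PySem.List.pyRange 1 (n + 1) 1).map (fun i => PySem.List.pyRange 0 i 1)).flatten
    silent_transition_indices.foldl (fun acc t =>
      let connection_1 : Option Int :=
        ((PySem.List.enumerate added_total_per_place 0).find? (fun ic => ic.2 > t)).map (·.1)
      let connection_2 : Option Int := PySem.List.pyGet? connections (PySem.Int.truncdiv t 2)
      -- places[connection_1] / places[connection_2]; outside Pre_ Python raises, the port defaults
      let pc1 : Int := (connection_1.bind (fun i => PySem.List.pyGet? places i)).getD 0
      let pc2 : Int := (connection_2.bind (fun i => PySem.List.pyGet? places i)).getD 0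
      let s : Int × Int := if PySem.Int.mod t 2 = 0 then (pc2, pc1) else (pc1, pc2)
      acc ++ [s]) []

-- ===== PORT B =====
-- while lo < hi: bisect for the smallest r with r*(r+1) > t
-- (fuel = hi - lo bounds the number of iterations; the loop always halts within it)
def pvBisectGo : Nat → Int → Int → Int → Int
  | 0, _, lo, _ => lo
  | fuel+1, t, lo, hi =>
    if lo < hi then
      let mid := PySem.Int.floordiv (lo + hi) 2
      if mid * (mid + 1) > t then pvBisectGo fuel t lo mid
      else pvBisectGo fuel t (mid + 1) hi
    else lo

def pvBisect (t lo hi : Int) : Int := pvBisectGo ((hi - lo).toNat) t lo hi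

def find_silent_transitions_alt (places : List Int) (silent_transition_indices : List Int) : List (Int × Int) :=
  let n : Int := (places.length : Int)
  silent_transition_indices.foldl (fun acc t =>
    let r : Int := pvBisect t 0 n
    -- pair index int(t / 2) (A's truncating convention), minus the triangular offset
    let c2 : Int := PySem.Int.truncdiv t 2 - PySem.Int.floordiv (r * (r - 1)) 2
    let s : Int × Int :=
      if PySem.Int.mod t 2 = 0 then
        ((PySem.List.pyGet? places c2).getD 0, (PySem.List.pyGet? places r).getD 0)
      else
        ((PySem.List.pyGet? places r).getD 0, (PySem.List.pyGet? places c2).getD 0)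
    acc ++ [s]) []

-- ===== PRECONDITION & SPEC =====
-- Pre_ admits indices in [-(2*len(places)+1), len*(len-1)) when there is at least one place:
-- above that range A raises (TypeError/IndexError); below it A returns a value only via a deep
-- negative-index wraparound into its connections table, where B's natural place indexing raises
-- IndexError.
def Pre_find_silent_transitions (places : List Int) (silent_transition_indices : List Int) : Prop :=
  ∀ t ∈ silent_transition_indices,
    1 ≤ places.length ∧
    -(2*(places.length:Int) + 1) ≤ t ∧ t < (places.length : Int) * ((places.length : Int) - 1)
instance (places : List Int) (silent_transition_indices : List Int) : Decidable (Pre_find_silent_transitions places silent_transition_indices) := by unfold Pre_find_silent_transitions; infer_instance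

def pvWitness_find_silent_transitions : List Int × List Int := ([3, 4, 5], [-7, -1, 0, 1, 2, 3, 4, 5])

def Spec_find_silent_transitions (places : List Int) (silent_transition_indices : List Int) (out : List (Int × Int)) : Prop := out = find_silent_transitions_alt places silent_transition_indices
instance (places : List Int) (silent_transition_indices : List Int) (out : List (Int × Int)) : Decidable (Spec_find_silent_transitions places silent_transition_indices out) := by unfold Spec_find_silent_transitions; infer_instance

-- ===== CLAIM (what is proved, stated in full; the proofs are below) =====
def Claim_equal_find_silent_transitions : Prop := ∀ (places : List Int) (silent_transition_indices : List Int), Dom_find_silent_transitions places silent_transition_indices → Pre_find_silent_transitions places silent_transition_indices → Spec_find_silent_transitions places silent_transition_indices (find_silent_transitions places silent_transition_indices)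

-- ===== LEMMAS AND PROOFS =====

-- triangular number (proof helper)
def pv_tri (r : Nat) : Nat := r*(r+1)/2

lemma pv_tri_succ (m : Nat) : pv_tri (m+1) = pv_tri m + (m+1) := by
  simp only [pv_tri]
  have h : (m+1)*(m+1+1) = m*(m+1) + 2*(m+1) := by ring
  omega

lemma pv_tri_mono {a b : Nat} (h : a ≤ b) : pv_tri a ≤ pv_tri b :=
  Nat.div_le_div_right (Nat.mul_le_mul h (by omega))

lemma pv_sum2 (m : Nat) : ((List.range m).map (fun j : Nat => (j:Int)*2)).sum = ((m:Int)-1)*(m:Int) := by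
  induction m with
  | zero => simp
  | succ k ih =>
    rw [List.range_succ, List.map_append, List.sum_append, ih]
    push_cast; simp; ring

-- A's added_total_per_place table is [k*(k+1) for k in range(n)]
lemma pv_added_total (n : Nat) :
    (PySem.List.pyRange 0 (n:Int) 1).map (fun i =>
      (PySem.List.slice ((PySem.List.pyRange 1 ((n:Int) + 1) 1).map (fun i => (i - 1) * 2)) none (some (i + 1))).sum)
    = (List.range n).map (fun k : Nat => (k:Int)*((k:Int)+1)) := by
  have e1 : ((n:Int) + 1 - 1).toNat = n := by omega
  have e0 : ((n:Int) - 0).toNat = n := by omega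
  rw [PySem.List.pyRange_one, PySem.List.pyRange_one, e1, e0, List.map_map, List.map_map]
  apply List.map_congr_left
  intro k hk
  rw [List.mem_range] at hk
  simp only [Function.comp_def]
  have : (0 + (k:Int) + 1) = ((k+1 : Nat) : Int) := by push_cast; ring
  rw [this, PySem.List.slice_to_natCast, ← List.map_take, List.take_range]
  have hmin : min (k+1) n = k+1 := by omega
  rw [hmin]
  have heq : ((List.range (k+1)).map (fun j : Nat => (1 + (j:Int) - 1) * 2)).sum
      = ((List.range (k+1)).map (fun j : Nat => (j:Int)*2)).sum := by
    congr 1; apply List.map_congr_left; intro j _; ring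
  rw [heq, pv_sum2 (k+1)]; push_cast; ring

-- the binary search returns the least r with r*(r+1) > t
lemma pvBisectGo_spec (t : Int) : ∀ (fuel : Nat) (lo hi : Int), (hi - lo).toNat ≤ fuel →
    0 ≤ lo → lo ≤ hi → hi*(hi+1) > t → (lo = 0 ∨ (lo-1)*lo ≤ t) →
    lo ≤ pvBisectGo fuel t lo hi ∧ pvBisectGo fuel t lo hi ≤ hi ∧
      (pvBisectGo fuel t lo hi)*((pvBisectGo fuel t lo hi)+1) > t ∧
      (pvBisectGo fuel t lo hi = 0 ∨ ((pvBisectGo fuel t lo hi)-1)*(pvBisectGo fuel t lo hi) ≤ t) := by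
  intro fuel
  induction fuel with
  | zero =>
    intro lo hi hf h0 hle hhi hlo
    have : lo = hi := by omega
    subst this
    exact ⟨le_refl _, le_refl _, hhi, hlo⟩
  | succ f ih =>
    intro lo hi hf h0 hle hhi hlo
    show _ ≤ pvBisectGo (f+1) t lo hi ∧ _
    by_cases h : lo < hi
    · have hmid : PySem.Int.floordiv (lo + hi) 2 = (lo+hi)/2 :=
        PySem.Int.floordiv_eq_ediv_of_pos (by omega)
      have hb : lo ≤ (lo+hi)/2 ∧ (lo+hi)/2 < hi := by omega
      by_cases hpred : ((lo+hi)/2) * ((lo+hi)/2 + 1) > t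
      · have hred : pvBisectGo (f+1) t lo hi = pvBisectGo f t lo ((lo+hi)/2) := by
          simp only [pvBisectGo, if_pos h, hmid, if_pos hpred]
        rw [hred]
        have := ih lo ((lo+hi)/2) (by omega) h0 hb.1 hpred hlo
        exact ⟨this.1, by omega, this.2.2.1, this.2.2.2⟩
      · have hred : pvBisectGo (f+1) t lo hi = pvBisectGo f t ((lo+hi)/2 + 1) hi := by
          simp only [pvBisectGo, if_pos h, hmid, if_neg hpred]
        rw [hred]
        push Not at hpred
        have := ih ((lo+hi)/2 + 1) hi (by omega) (by omega) (by omega) hhi (Or.inr (by nlinarith))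
        exact ⟨by omega, this.2.1, this.2.2.1, this.2.2.2⟩
    · have : lo = hi := by omega
      subst this
      simp only [pvBisectGo, if_neg h]
      exact ⟨le_refl _, le_refl _, hhi, hlo⟩

lemma pvBisect_spec (t lo hi : Int) :
    0 ≤ lo → lo ≤ hi → hi*(hi+1) > t → (lo = 0 ∨ (lo-1)*lo ≤ t) →
    lo ≤ pvBisect t lo hi ∧ pvBisect t lo hi ≤ hi ∧
      (pvBisect t lo hi)*((pvBisect t lo hi)+1) > t ∧
      (pvBisect t lo hi = 0 ∨ ((pvBisect t lo hi)-1)*(pvBisect t lo hi) ≤ t) := by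
  intro h0 hle hhi hlo
  unfold pvBisect
  exact pvBisectGo_spec t ((hi - lo).toNat) lo hi (le_refl _) h0 hle hhi hlo

-- next(...) over enumerate: the first index whose value exceeds t
lemma pv_find_enum (t : Int) (xs : List Int) : ∀ (s : Int) (r : Nat) (hr : r < xs.length),
    (∀ j : Nat, (hj : j < r) → ¬ (xs[j]'(by omega) > t)) → xs[r] > t →
    (PySem.List.enumerate xs s).find? (fun ic => ic.2 > t) = some (s + (r:Int), xs[r]) := by
  induction xs with
  | nil => intro s r hr; simp at hr
  | cons x tl ih =>
    intro s r hr hmin hhit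
    rw [PySem.List.enumerate_cons]
    cases r with
    | zero =>
      simp only [List.getElem_cons_zero] at hhit
      simp [hhit]
    | succ k =>
      have hx : ¬ (x > t) := by
        have := hmin 0 (by omega); simpa using this
      have hk : k < tl.length := by simpa using hr
      have hmin' : ∀ j : Nat, (hj : j < k) → ¬ (tl[j]'(by omega) > t) := by
        intro j hj
        have := hmin (j+1) (by omega)
        simpa using this
      have hhit' : tl[k] > t := by simpa using hhit
      have := ih (s+1) k hk hmin' hhit'
      rw [List.find?_cons_of_neg (by simpa using hx), this]
      congr 1
      simp only [List.getElem_cons_succ]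
      congr 1
      push_cast; ring
  
lemma pv_conns_succ (m : Nat) :
    ((PySem.List.pyRange 1 (((m+1:Nat):Int)+1) 1).map (fun i => PySem.List.pyRange 0 i 1)).flatten
    = ((PySem.List.pyRange 1 ((m:Int)+1) 1).map (fun i => PySem.List.pyRange 0 i 1)).flatten
      ++ PySem.List.pyRange 0 ((m:Int)+1) 1 := by
  have h : ((m+1:Nat):Int)+1 = ((m:Int)+1)+1 := by push_cast; ring
  rw [h, PySem.List.pyRange_one_succ_right (by omega : (1:Int) ≤ (m:Int)+1)]
  rw [List.map_append, List.flatten_append]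
  simp

lemma pv_conns_len (n : Nat) :
    (((PySem.List.pyRange 1 ((n:Int)+1) 1).map (fun i => PySem.List.pyRange 0 i 1)).flatten).length = pv_tri n := by
  induction n with
  | zero =>
    simp [PySem.List.pyRange_one, pv_tri]
  | succ m ih =>
    rw [pv_conns_succ m, List.length_append, ih, PySem.List.length_pyRange_one, pv_tri_succ]
    omega

lemma pv_conns_get (n : Nat) : ∀ (rr q : Nat), rr < n → pv_tri rr ≤ q → q < pv_tri (rr+1) →
    ((((PySem.List.pyRange 1 ((n:Int)+1) 1).map (fun i => PySem.List.pyRange 0 i 1)).flatten)[q]? : Option Int)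
      = some ((q:Int) - ((pv_tri rr : Nat):Int)) := by
  induction n with
  | zero => intro rr q h; omega
  | succ m ih =>
    intro rr q hrr hlo hhi
    rw [pv_conns_succ m]
    by_cases hq : q < pv_tri m
    · have hrm : rr < m := by
        by_contra hc
        have := pv_tri_mono (show m ≤ rr by omega)
        omega
      rw [List.getElem?_append_left (by rw [pv_conns_len]; omega)]
      exact ih rr q hrm hlo hhi
    · have hrm : rr = m := by
        by_contra hc
        have : rr + 1 ≤ m := by omega
        have := pv_tri_mono this
        omega
      subst hrm
      rw [List.getElem?_append_right (by rw [pv_conns_len]; omega)]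
      rw [pv_conns_len]
      have hlen : q - pv_tri rr < (PySem.List.pyRange 0 ((rr:Int)+1) 1).length := by
        rw [PySem.List.length_pyRange_one]
        have := pv_tri_succ rr
        omega
      rw [List.getElem?_eq_getElem hlen, PySem.List.getElem_pyRange_one]
      congr 1
      push_cast [Nat.cast_sub hlo]
      ring

-- ===== VERDICT (by name: the statement is the Claim_ definition above) =====
lemma pv_natCast_div2 (a : Nat) : ((a/2 : Nat) : Int) = (a:Int)/2 := by omega

theorem find_silent_transitions_spec : Claim_equal_find_silent_transitions := by
  intro places silent _dom hpre
  unfold Spec_find_silent_transitions find_silent_transitions find_silent_transitions_alt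
  cases silent with
  | nil => simp
  | cons t0 rest =>
    rw [if_neg (by simp)]
    rw [PySem.List.foldl_append_singleton_eq_map, PySem.List.foldl_append_singleton_eq_map]
    simp only [List.nil_append]
    apply List.map_congr_left
    intro t ht
    obtain ⟨hn1, hbrl, htn⟩ := hpre t ht
    set n := places.length with hn_def
    set N := (n:Int) with hNd
    have hN1 : (1:Int) ≤ N := by omega
    have hNN : N*(N+1) > t := by nlinarith
    have hspec := pvBisect_spec t 0 N (le_refl 0) (by omega) hNN (Or.inl rfl)
    set r := pvBisect t 0 N with hrd
    obtain ⟨hr0, hrN', hrgt, hrcases⟩ := hspec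
    rw [pv_added_total n]
    set xs : List Int := (List.range n).map (fun k : Nat => (k:Int)*((k:Int)+1)) with hxsd
    have hxs_len : xs.length = n := by simp [hxsd]
    have hget : ∀ j : Nat, j < n → ∀ (hj : j < xs.length), xs[j]'hj = (j:Int)*((j:Int)+1) := by
      intro j hjn hj; simp [hxsd]
    rcases (Int.lt_or_le t 0).symm with ht0 | htneg
    · -- 0 ≤ t: r is the first row with r*(r+1) > t, int(t/2.) = t/2
      have hn2 : 2 ≤ n := by
        rcases n with _ | n'
        · simp [hNd] at htn; omega
        · rcases n' with _ | n''
          · norm_num [hNd] at htn; omega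
          · omega
      have hr1 : 1 ≤ r := by
        rcases Int.lt_or_le 0 r with h | h
        · omega
        · exfalso; have : r = 0 := by omega
          rw [this] at hrgt; omega
      have hrl : (r-1)*r ≤ t := by
        rcases hrcases with h | h
        · omega
        · exact h
      have hrN : r < N := by
        by_contra hc
        push Not at hc
        nlinarith [mul_nonneg (sub_nonneg.2 hc) (show (0:Int) ≤ r + N - 1 by omega)]
      set rn := r.toNat with hrnd
      have hrcast : (rn:Int) = r := by omega
      have hrn1 : 1 ≤ rn := by omega
      have hrn_lt : rn < n := by omega
      have hmin : ∀ j : Nat, (hj : j < rn) → ¬ (xs[j]'(by omega) > t) := by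
        intro j hj
        rw [hget j (by omega)]
        push Not
        have hjr : (j:Int) ≤ r - 1 := by omega
        have h1 : (0:Int) ≤ r - 1 - j := by omega
        have h2 : (0:Int) ≤ r + j := by omega
        nlinarith [mul_nonneg h1 h2]
      have hhit : xs[rn]'(by omega) > t := by
        rw [hget rn (by omega), hrcast]
        exact hrgt
      have hfind := pv_find_enum t xs 0 rn (by omega) hmin hhit
      have htd : PySem.Int.truncdiv t 2 = t/2 := by
        unfold PySem.Int.truncdiv; rw [Int.tdiv_eq_ediv_of_nonneg ht0]
      set p := t/2 with hpd
      have hp0 : 0 ≤ p := by omega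
      rw [htd, hfind]
      have hptn : ((p.toNat : Int)) = p := by omega
      have hcastA : (((rn-1)*rn : Nat) : Int) = (r-1)*r := by
        push_cast [Nat.cast_sub hrn1]
        rw [hrcast]
      have htri1 : pv_tri (rn-1) = (rn-1)*rn/2 := by
        simp only [pv_tri, Nat.sub_add_cancel hrn1]
      have heven : ∃ k : Int, r*(r+1) = k + k := by
        obtain ⟨k, hk⟩ := Int.even_mul_succ_self r
        exact ⟨k, hk⟩
      obtain ⟨K, hK⟩ := heven
      have hKcast : ((rn*(rn+1) : Nat) : Int) = K + K := by push_cast [hrcast]; omega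
      obtain ⟨M, hM⟩ := Int.even_mul_succ_self (r-1)
      have hM' : (r-1)*r = M + M := by rw [← hM]; ring
      have hA_le : (rn-1)*rn ≤ 2*p.toNat := by
        have : (((rn-1)*rn : Nat) : Int) ≤ ((2*p.toNat : Nat) : Int) := by
          rw [hcastA]; push_cast; omega
        exact_mod_cast this
      have hlo : pv_tri (rn-1) ≤ p.toNat := by rw [htri1]; omega
      have hhi : p.toNat < pv_tri rn := by
        simp only [pv_tri]
        have h2 : 2*p.toNat + 2 ≤ rn*(rn+1) := by
          have : ((2*p.toNat + 2 : Nat) : Int) ≤ ((rn*(rn+1) : Nat) : Int) := by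
            rw [hKcast]; push_cast; omega
          exact_mod_cast this
        omega
      have hhi' : p.toNat < pv_tri (rn-1+1) := by rw [Nat.sub_add_cancel hrn1]; exact hhi
      have hconns := pv_conns_get n (rn-1) p.toNat (by omega) hlo hhi'
      have hgetp : ∀ (ys : List Int), PySem.List.pyGet? ys p = ys[p.toNat]? :=
        fun ys => PySem.List.pyGet?_of_nonneg ys hp0
      rw [hgetp, hconns]
      have hfd2 : PySem.Int.floordiv (r*(r-1)) 2 = (r*(r-1))/2 :=
        PySem.Int.floordiv_eq_ediv_of_pos (by omega)
      have hc2 : (p.toNat : Int) - ((pv_tri (rn-1) : Nat) : Int) = p - PySem.Int.floordiv (r*(r-1)) 2 := by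
        rw [hfd2, hptn, htri1, pv_natCast_div2, hcastA]
        congr 1
        congr 1
        ring
      have h0rn : 0 + (rn : Int) = r := by omega
      rw [hc2, h0rn]
      simp [Option.bind]
    · -- t < 0: the first row is 0 and both sides read place int(t/2.) (wrapping from the end)
      have hr00 : r = 0 := by
        rcases hrcases with h | h
        · exact h
        · have h1 : 0 ≤ (r-1)*r := by
            rcases (show r = 0 ∨ 1 ≤ r by omega) with h2 | h2
            · rw [h2]; norm_num
            · exact mul_nonneg (by omega) (by omega)
          omega
      have hhit : xs[0]'(by omega) > t := by
        simp only [hxsd, List.getElem_map, List.getElem_range]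
        push_cast
        omega
      have hfind := pv_find_enum t xs 0 0 (by omega) (by intro j hj; exact absurd hj (Nat.not_lt_zero j)) hhit
      have htd : PySem.Int.truncdiv t 2 = if 2 ∣ t then t/2 else t/2 + 1 := by
        unfold PySem.Int.truncdiv
        by_cases he : 2 ∣ t
        · rw [if_pos he]
          obtain ⟨c, hc⟩ := he
          rw [hc, Int.mul_tdiv_cancel_left _ (by norm_num), Int.mul_ediv_cancel_left _ (by norm_num)]
        · rw [if_neg he, Int.tdiv_eq_ediv, if_neg (by push Not; exact ⟨by omega, he⟩)]
          norm_num
      set q := PySem.Int.truncdiv t 2 with hqd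
      have hq : -N ≤ q ∧ q ≤ 0 := by
        by_cases he : 2 ∣ t
        · rw [if_pos he] at htd; omega
        · rw [if_neg he] at htd; omega
      rw [hfind, hr00]
      have hB0 : PySem.Int.floordiv ((0:Int)*(0-1)) 2 = 0 := by
        rw [PySem.Int.floordiv_eq_ediv_of_pos (by omega)]; norm_num
      rw [hB0, sub_zero]
      rcases (show q = 0 ∨ q < 0 by omega) with hq0 | hqneg
      · -- t = -1: int(t/2.) = 0, both sides read place 0
        rw [hq0]
        have hgetp0 : ∀ (ys : List Int), PySem.List.pyGet? ys (0:Int) = ys[(0:Nat)]? :=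
          fun ys => PySem.List.pyGet?_of_nonneg ys (le_refl 0)
        have hconns := pv_conns_get n 0 0 (by omega) (by simp [pv_tri]) (by norm_num [pv_tri])
        rw [hgetp0, hconns]
        simp [Option.bind, pv_tri]
      · -- -n ≤ int(t/2.) ≤ -1: A wraps in connections (last block), B wraps in places
        set k := (-q).toNat with hkd
        have hk1 : 1 ≤ k := by omega
        have hkn : k ≤ n := by omega
        have hkq : q = -((k:Int)) := by omega
        have htr : pv_tri n = pv_tri (n-1) + n := by
          have h := pv_tri_succ (n-1)
          rw [Nat.sub_add_cancel hn1] at h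
          omega
        have hntri : n ≤ pv_tri n := by
          have h2 := Nat.mul_le_mul_left n (show 2 ≤ n+1 by omega)
          simp only [pv_tri]
          omega
        rw [hkq, PySem.List.pyGet?_neg_natCast _ k (by omega) (by rw [pv_conns_len n]; omega)]
        rw [pv_conns_len n]
        have hconns := pv_conns_get n (n-1) (pv_tri n - k) (by omega) (by omega) (by rw [Nat.sub_add_cancel hn1]; omega)
        rw [hconns]
        have hval : ((pv_tri n - k : Nat):Int) - (((pv_tri (n-1)) : Nat):Int) = ((n - k : Nat) : Int) := by
          push_cast [Nat.cast_sub (by omega : k ≤ pv_tri n), Nat.cast_sub hkn]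
          omega
        rw [hval]
        rw [PySem.List.pyGet?_neg_natCast places k (by omega) (by omega : k ≤ places.length)]
        rw [show places.length = n from rfl]
        simp [Option.bind]
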